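-- pv_equiv track=rewrite | github.com/zatosource/zato | code/zato-openapi/src/zato/openapi/generator/utils.py | generate_service_summary
-- ===== SOURCE A (Python) =====
-- def generate_service_summary(service_name:'str') -> 'str':
--     """ Generates a summary for a service based on its name.
--     """
--     # Use service name and convert to readable format
--     clean_name = service_name.split('.')[-1]  # Get last part of name
--     words = []
--
--     # Split by underscores, dots, or camel case
--     current_word = ''
--     for i, char in enumerate(clean_name):
--         if char == '_' or char == '.':
--             if current_word:
--                 words.append(current_word)
--                 current_word = ''
--         elif char.isupper() and i > 0 and clean_name[i-1].islower():
--             # CamelCase boundary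
--             words.append(current_word)
--             current_word = char
--         else:
--             current_word += char
--
--     if current_word:
--         words.append(current_word)
--
--     # Capitalize each word and join with spaces
--     if words:
--         title = ' '.join(word.capitalize() for word in words)
--         return f'{title} Operation'
--
--     return 'API Operation'
-- ===== SOURCE B (Python) =====
-- import re
--
-- _SPLIT_RX = re.compile(r'[_.]|(?<=[a-z])(?=[A-Z])')
--
-- def generate_service_summary(service_name: 'str') -> 'str':
--     """ Generates a summary for a service based on its name.
--     """
--     clean_name = service_name.split('.')[-1]
--     words = [w for w in _SPLIT_RX.split(clean_name) if w]
--     if words: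
--         return ' '.join(w.capitalize() for w in words) + ' Operation'
--     return 'API Operation'
-- ===== Notes on version B (the rewrite author's own statement) =====
-- stated objective: idiomatic
-- what changed: B replaces A's indexed character-accumulator loop (enumerate with clean_name[i-1] lookback and mutable words/current_word state) by a single precompiled regex split on underscore/dot/lower-to-upper boundaries followed by a filter-and-join comprehension.
import Mathlib
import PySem

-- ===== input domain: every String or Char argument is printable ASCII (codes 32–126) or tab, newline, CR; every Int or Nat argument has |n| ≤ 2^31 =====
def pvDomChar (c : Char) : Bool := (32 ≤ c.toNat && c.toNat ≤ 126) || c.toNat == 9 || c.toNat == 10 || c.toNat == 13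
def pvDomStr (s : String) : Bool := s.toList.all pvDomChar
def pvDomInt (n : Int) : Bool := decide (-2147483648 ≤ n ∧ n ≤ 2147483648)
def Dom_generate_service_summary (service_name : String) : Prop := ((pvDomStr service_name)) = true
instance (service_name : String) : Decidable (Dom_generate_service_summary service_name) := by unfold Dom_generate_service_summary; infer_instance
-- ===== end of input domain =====

-- B rebuilds the word list with one regex-style splitter (split on '_'/'.' and lower→upper
-- boundaries, drop empties) instead of A's indexed character-accumulator loop; objective: idiomatic.

-- shared helper: Python's str.capitalize() — first char uppercased, rest lowered
-- (exact on the ASCII domain, where Python's title-casing of the first char is uppercasing)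
def pvCapitalize (w : List Char) : List Char :=
  match w with
  | [] => []
  | c :: r => PySem.Chars.upperChar c :: PySem.Chars.lower r

-- ===== PORT A =====
-- loop body of A's `for i, char in enumerate(clean_name)` (state = (words, current_word));
-- `clean_name[i-1]` is ported with pyGet?, guarded (as in A) by `i > 0`
def pvBodyA (full : List Char) (st : List (List Char) × List Char) (p : Int × Char) :
    List (List Char) × List Char :=
  let words := st.1
  let cur := st.2
  let i := p.1
  let c := p.2
  if c == '_' || c == '.' then
    if cur ≠ [] then (words ++ [cur], []) else (words, [])
  else if PySem.Chars.isupper c && decide (0 < i) &&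
      (match PySem.List.pyGet? full (i - 1) with
       | some pc => PySem.Chars.islower pc
       | none => false) then
    (words ++ [cur], [c])
  else
    (words, cur ++ [c])

def generate_service_summary (service_name : String) : String :=
  -- clean_name = service_name.split('.')[-1]; split('.') is never empty, so [-1] never raises
  let clean := PySem.List.pyGetD (PySem.Chars.splitOn service_name.toList ['.']) (-1) []
  let st := (PySem.List.enumerate clean 0).foldl (pvBodyA clean) ([], [])
  let words := if st.2 ≠ [] then st.1 ++ [st.2] else st.1
  if words ≠ [] then
    String.ofList (PySem.Chars.join [' '] (words.map pvCapitalize) ++ (" Operation").toList)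
  else
    "API Operation"

-- ===== PORT B =====
-- hand-port of re.split(r'[_.]|(?<=[a-z])(?=[A-Z])', s): a scan carrying the previous
-- character (the lookbehind); pieces are accumulated reversed and emitted at each match
def pvPrevLower (prev : Option Char) : Bool :=
  match prev with
  | none => false
  | some p => PySem.Chars.islower p

def pvReSplit (prev : Option Char) (acc : List Char) : List Char → List (List Char)
  | [] => [acc.reverse]
  | c :: rest =>
    if c == '_' || c == '.' then
      acc.reverse :: pvReSplit (some c) [] rest
    else if PySem.Chars.isupper c && pvPrevLower prev then
      -- zero-width match between a lowercase prev and an uppercase c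
      acc.reverse :: pvReSplit (some c) [c] rest
    else
      pvReSplit (some c) (c :: acc) rest

def generate_service_summary_alt (service_name : String) : String :=
  let clean := PySem.List.pyGetD (PySem.Chars.splitOn service_name.toList ['.']) (-1) []
  let words := (pvReSplit none [] clean).filter (· ≠ [])
  if words = [] then "API Operation"
  else String.ofList (PySem.Chars.join [' '] (words.map pvCapitalize) ++ (" Operation").toList)

-- ===== PRECONDITION & SPEC =====
def Spec_generate_service_summary (service_name : String) (out : String) : Prop := out = generate_service_summary_alt service_name
instance (service_name : String) (out : String) : Decidable (Spec_generate_service_summary service_name out) := by unfold Spec_generate_service_summary; infer_instance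

-- ===== CLAIM (what is proved, stated in full; the proofs are below) =====
def Claim_equal_generate_service_summary : Prop := ∀ (service_name : String), Dom_generate_service_summary service_name → Spec_generate_service_summary service_name (generate_service_summary service_name)

-- ===== LEMMAS AND PROOFS =====

-- A's state after the loop, plus the final `if current_word: words.append(current_word)`
def pvFlush (st : List (List Char) × List Char) : List (List Char) :=
  if st.2 ≠ [] then st.1 ++ [st.2] else st.1

-- the indexed foldl of A, read as a scan carrying the previous character
def pvScanA (words : List (List Char)) (cur : List Char) (prev : Option Char) :
    List Char → List (List Char) × List Char
  | [] => (words, cur)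
  | c :: rest =>
    if c == '_' || c == '.' then
      pvScanA (if cur ≠ [] then words ++ [cur] else words) [] (some c) rest
    else if PySem.Chars.isupper c && pvPrevLower prev then
      pvScanA (words ++ [cur]) [c] (some c) rest
    else
      pvScanA words (cur ++ [c]) (some c) rest

theorem pvPrevTest (pre l : List Char) :
    (decide (0 < (pre.length : Int)) &&
      (match PySem.List.pyGet? (pre ++ l) ((pre.length : Int) - 1) with
       | some pc => PySem.Chars.islower pc
       | none => false)) = pvPrevLower pre.getLast? := by
  by_cases h : pre = []
  · simp [h, pvPrevLower, PySem.List.pyGet?]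
  · have hl : 0 < pre.length := List.length_pos_iff.mpr h
    have hcast : ((pre.length : Int) - 1) = ((pre.length - 1 : Nat) : Int) := by omega
    rw [hcast, PySem.List.pyGet?_natCast, List.getElem?_append_left (by omega),
      ← List.getLast?_eq_getElem?]
    cases hg : pre.getLast? with
    | none => simp [List.getLast?_eq_none_iff] at hg; exact absurd hg h
    | some p => simp [pvPrevLower, hl]

theorem pvBodyA_head (pre : List Char) (c : Char) (l : List Char)
    (st : List (List Char) × List Char) :
    pvBodyA (pre ++ c :: l) st ((pre.length : Int), c) =
      (if c == '_' || c == '.' then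
        (if st.2 ≠ [] then (st.1 ++ [st.2], ([] : List Char)) else (st.1, []))
      else if PySem.Chars.isupper c && pvPrevLower pre.getLast? then (st.1 ++ [st.2], [c])
      else (st.1, st.2 ++ [c])) := by
  unfold pvBodyA
  simp only []
  rw [Bool.and_assoc, pvPrevTest pre (c :: l)]

theorem pvFoldA_eq_scanA (suffix : List Char) : ∀ (pre : List Char)
    (st : List (List Char) × List Char),
    (PySem.List.enumerate suffix (pre.length : Int)).foldl (pvBodyA (pre ++ suffix)) st
      = pvScanA st.1 st.2 pre.getLast? suffix := by
  induction suffix with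
  | nil => intro pre st; simp [pvScanA, PySem.List.enumerate]
  | cons c rest ih =>
    intro pre st
    have hfull : pre ++ c :: rest = (pre ++ [c]) ++ rest := by simp
    have hlen : ((pre.length : Int) + 1) = (((pre ++ [c]).length : Nat) : Int) := by
      simp
    rw [PySem.List.enumerate_cons, List.foldl_cons, pvBodyA_head pre c rest st,
      hfull, hlen, ih (pre ++ [c]), List.getLast?_concat, pvScanA]
    by_cases h1 : (c == '_' || c == '.') = true
    · by_cases hc : st.2 = [] <;> simp [h1, hc]
    · by_cases h2 : (PySem.Chars.isupper c && pvPrevLower pre.getLast?) = true <;>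
        simp [h1, h2]

theorem pvScanA_eq_reSplit (l : List Char) : ∀ (cur : List Char) (words : List (List Char))
    (prev : Option Char), (pvPrevLower prev = true → cur ≠ []) →
    pvFlush (pvScanA words cur prev l)
      = words ++ (pvReSplit prev cur.reverse l).filter (· ≠ []) := by
  induction l with
  | nil =>
    intro cur words prev _
    by_cases h : cur = [] <;> simp [pvScanA, pvReSplit, pvFlush, h]
  | cons c rest ih =>
    intro cur words prev hinv
    by_cases h1 : (c == '_' || c == '.') = true
    · rw [pvScanA, pvReSplit, if_pos h1, if_pos h1,
        ih [] (if cur ≠ [] then words ++ [cur] else words) (some c)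
          (by simp [pvPrevLower, PySem.Chars.islower]; intro h; simp at h1; rcases h1 with h1 | h1 <;> simp [h1] at h ⊢)]
      by_cases h : cur = [] <;> simp [h]
    · by_cases h2 : (PySem.Chars.isupper c && pvPrevLower prev) = true
      · rw [pvScanA, pvReSplit, if_neg h1, if_neg h1, if_pos h2, if_pos h2,
          ih [c] (words ++ [cur]) (some c) (by simp)]
        have hc : cur ≠ [] := hinv (by simp at h2; exact h2.2)
        simp [hc]
      · rw [pvScanA, pvReSplit, if_neg h1, if_neg h1, if_neg h2, if_neg h2,
          ih (cur ++ [c]) words (some c) (by simp)]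
        simp

theorem words_agree (clean : List Char) :
    (if ((PySem.List.enumerate clean 0).foldl (pvBodyA clean) ([], [])).2 ≠ [] then
       ((PySem.List.enumerate clean 0).foldl (pvBodyA clean) ([], [])).1
         ++ [((PySem.List.enumerate clean 0).foldl (pvBodyA clean) ([], [])).2]
     else ((PySem.List.enumerate clean 0).foldl (pvBodyA clean) ([], [])).1)
      = (pvReSplit none [] clean).filter (· ≠ []) := by
  have h1 := pvFoldA_eq_scanA clean [] ([], [])
  simp only [List.length_nil, Nat.cast_zero, List.nil_append, List.getLast?_nil] at h1
  have h2 := pvScanA_eq_reSplit clean [] [] none (by simp [pvPrevLower])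
  rw [h1]
  simpa [pvFlush] using h2

theorem pvAB_eq (s : String) : generate_service_summary s = generate_service_summary_alt s := by
  have hW := words_agree (PySem.List.pyGetD (PySem.Chars.splitOn s.toList ['.']) (-1) [])
  simp only [generate_service_summary, generate_service_summary_alt]
  rw [hW]
  by_cases hcase : (pvReSplit none []
      (PySem.List.pyGetD (PySem.Chars.splitOn s.toList ['.']) (-1) [])).filter (· ≠ []) = []
  · rw [if_neg (by simpa using hcase), if_pos hcase]
  · rw [if_pos hcase, if_neg hcase]

-- ===== VERDICT (by name: the statement is the Claim_ definition above) =====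
theorem generate_service_summary_spec : Claim_equal_generate_service_summary := by
  intro s _
  unfold Spec_generate_service_summary
  exact pvAB_eq s
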